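-- pv_equiv track=rewrite | github.com/snyk/studio-recipes | guardrail_directives/secure_at_inception/hooks_version/cursor/async_cli_version/snyk_secure_at_inception.py | compute_modified_ranges
-- ===== SOURCE A (Python) =====
-- from typing import Any, Dict, List, Optional
--
-- def compute_modified_ranges(
--     file_content: str, edits: List[Dict[str, str]]
-- ) -> List[Dict[str, int]]:
--     """Locate new_string in post-edit file content to determine modified line ranges."""
--     ranges: List[Dict[str, int]] = []
--     search_offset = 0
--
--     for edit in edits:
--         new_str = edit.get("new_string", "")
--         if not new_str:
--             continue
--
--         idx = file_content.find(new_str, search_offset)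
--         if idx < 0:
--             idx = file_content.find(new_str)
--
--         if idx >= 0:
--             start_line = file_content[:idx].count('\n') + 1
--             end_line = start_line + new_str.count('\n')
--             ranges.append({"start": start_line, "end": end_line})
--             search_offset = idx + len(new_str)
--
--     return _merge_ranges(ranges)
--
-- def _merge_ranges(ranges: List[Dict[str, int]]) -> List[Dict[str, int]]:
--     if not ranges:
--         return []
--     sorted_ranges = sorted(ranges, key=lambda r: r["start"])
--     merged: List[Dict[str, int]] = [sorted_ranges[0].copy()]
--     for current in sorted_ranges[1:]:
--         last = merged[-1]
--         if current["start"] <= last["end"] + 1: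
--             last["end"] = max(last["end"], current["end"])
--         else:
--             merged.append(current.copy())
--     return merged
-- ===== SOURCE B (Python) =====
-- from typing import Dict, List
--
--
-- def compute_modified_ranges(
--     file_content: str, edits: List[Dict[str, str]]
-- ) -> List[Dict[str, int]]:
--     """Same result as A: line numbers come from a line-number table built in
--     one pass (a lookup per edit instead of rescanning the prefix), ranges are
--     kept as plain (start, end) tuples, and the merge is inlined; dicts are only
--     built at the very end."""
--     # line_at[i] = 1-based line number of offset i (= 1 + newlines in file_content[:i])
--     line_at = [1]
--     ln = 1
--     for ch in file_content:
--         if ch == '\n':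
--             ln += 1
--         line_at.append(ln)
--
--     pairs = []
--     search_offset = 0
--     for edit in edits:
--         new_str = edit.get("new_string", "")
--         if not new_str:
--             continue
--         idx = file_content.find(new_str, search_offset)
--         if idx < 0:
--             idx = file_content.find(new_str)
--         if idx >= 0:
--             start = line_at[idx]
--             pairs.append((start, start + new_str.count('\n')))
--             search_offset = idx + len(new_str)
--
--     pairs.sort(key=lambda p: p[0])
--     merged = []
--     for s, e in pairs:
--         if merged and s <= merged[-1][1] + 1:
--             ls, le = merged[-1]
--             merged[-1] = (ls, max(le, e))
--         else:
--             merged.append((s, e))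
--     return [{"start": s, "end": e} for s, e in merged]
-- ===== Notes on version B (the rewrite author's own statement) =====
-- stated objective: alternative
-- what changed: B precomputes an offset-to-line-number table in one pass and looks line numbers up per edit instead of recounting newlines in the whole file prefix for every edit, keeps ranges as plain (start,end) tuples merged via tuple replacement, and materialises the {start,end} dicts only once at the end.
import Mathlib
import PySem

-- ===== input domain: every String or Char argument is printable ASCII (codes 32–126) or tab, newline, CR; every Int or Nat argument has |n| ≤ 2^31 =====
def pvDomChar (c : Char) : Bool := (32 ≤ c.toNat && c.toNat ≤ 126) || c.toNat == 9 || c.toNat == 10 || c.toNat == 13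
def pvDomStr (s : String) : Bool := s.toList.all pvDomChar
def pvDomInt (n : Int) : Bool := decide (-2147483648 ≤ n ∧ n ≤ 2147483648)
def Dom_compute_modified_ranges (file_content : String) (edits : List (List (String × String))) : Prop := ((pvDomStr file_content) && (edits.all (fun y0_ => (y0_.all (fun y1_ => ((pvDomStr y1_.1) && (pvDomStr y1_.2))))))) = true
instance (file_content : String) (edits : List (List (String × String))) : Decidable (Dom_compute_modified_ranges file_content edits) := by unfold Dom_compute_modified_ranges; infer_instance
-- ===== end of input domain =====

-- B builds an offset→line-number table in one pass and merges plain (start,end)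
-- tuples (dicts built only at the end), instead of A's per-edit prefix rescan and
-- dict-based in-place merge.

-- ===== PORT A =====
-- edit.get("new_string", "") : first-match lookup in the association list (Python dict get)
def pvDictGetD (d : List (String × String)) (k dflt : String) : String :=
  ((d.find? (fun p => p.1 == k)).map Prod.snd).getD dflt

-- r[k] for the {"start": _, "end": _} dicts (key always present; 0 never used)
def pvDictGetIntD (r : List (String × Int)) (k : String) (dflt : Int) : Int :=
  ((r.find? (fun p => p.1 == k)).map Prod.snd).getD dflt

-- last[k] = v : overwrite in place (keeps position) or append (Python dict assignment)
def pvDictSetInt (r : List (String × Int)) (k : String) (v : Int) : List (String × Int) :=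
  if r.any (fun p => p.1 == k) then r.map (fun p => if p.1 == k then (k, v) else p)
  else r ++ [(k, v)]

-- _merge_ranges, transliterated
def pvMergeRanges (ranges : List (List (String × Int))) : List (List (String × Int)) :=
  if ranges = [] then []
  else
    let sorted_ranges := PySem.List.sorted ranges (fun r => pvDictGetIntD r "start" 0)
    (PySem.List.slice sorted_ranges (some 1) none).foldl
      (fun merged current =>
        let last := PySem.List.pyGetD merged (-1) []
        if pvDictGetIntD current "start" 0 ≤ pvDictGetIntD last "end" 0 + 1 then
          merged.dropLast ++
            [pvDictSetInt last "end"
              (max (pvDictGetIntD last "end" 0) (pvDictGetIntD current "end" 0))]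
        else merged ++ [current])
      [PySem.List.pyGetD sorted_ranges 0 []]

def compute_modified_ranges (file_content : String) (edits : List (List (String × String))) : List (List (String × Int)) :=
  let st := edits.foldl
    (fun (st : List (List (String × Int)) × Int) edit =>
      let new_str := pvDictGetD edit "new_string" ""
      if new_str = "" then st
      else
        let idx0 := PySem.Str.findFrom file_content new_str st.2
        let idx := if idx0 < 0 then PySem.Str.find file_content new_str else idx0
        if 0 ≤ idx then
          let start_line := (PySem.Str.count (PySem.Str.slice file_content none (some idx)) "\n" : Int) + 1
          let end_line := start_line + (PySem.Str.count new_str "\n" : Int)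
          (st.1 ++ [[("start", start_line), ("end", end_line)]], idx + PySem.Str.len new_str)
        else st)
    ([], 0)
  pvMergeRanges st.1

-- ===== PORT B =====
-- line_at[i] = 1 + number of '\n' in file_content[:i], built in one pass
def pvLineTable (file_content : String) : List Int :=
  (file_content.toList.foldl
    (fun (st : List Int × Int) ch =>
      let ln := if ch = '\n' then st.2 + 1 else st.2
      (st.1 ++ [ln], ln))
    ([1], 1)).1

def compute_modified_ranges_alt (file_content : String) (edits : List (List (String × String))) : List (List (String × Int)) :=
  let line_at := pvLineTable file_content
  let st := edits.foldl
    (fun (st : List (Int × Int) × Int) edit =>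
      let new_str := pvDictGetD edit "new_string" ""
      if new_str = "" then st
      else
        let idx0 := PySem.Str.findFrom file_content new_str st.2
        let idx := if idx0 < 0 then PySem.Str.find file_content new_str else idx0
        if 0 ≤ idx then
          let start := PySem.List.pyGetD line_at idx 0
          (st.1 ++ [(start, start + (PySem.Str.count new_str "\n" : Int))], idx + PySem.Str.len new_str)
        else st)
    ([], 0)
  let merged := (PySem.List.sorted st.1 (fun p => p.1)).foldl
    (fun (merged : List (Int × Int)) p =>
      if merged ≠ [] ∧ p.1 ≤ (PySem.List.pyGetD merged (-1) (0, 0)).2 + 1 then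
        let last := PySem.List.pyGetD merged (-1) (0, 0)
        PySem.List.pySetD merged (-1) (last.1, max last.2 p.2)
      else merged ++ [p])
    []
  merged.map (fun p => [("start", p.1), ("end", p.2)])

-- ===== PRECONDITION & SPEC =====
def Spec_compute_modified_ranges (file_content : String) (edits : List (List (String × String))) (out : List (List (String × Int))) : Prop := out = compute_modified_ranges_alt file_content edits
instance (file_content : String) (edits : List (List (String × String))) (out : List (List (String × Int))) : Decidable (Spec_compute_modified_ranges file_content edits out) := by unfold Spec_compute_modified_ranges; infer_instance

-- ===== CLAIM (what is proved, stated in full; the proofs are below) =====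
def Claim_equal_compute_modified_ranges : Prop := ∀ (file_content : String) (edits : List (List (String × String))), Dom_compute_modified_ranges file_content edits → Spec_compute_modified_ranges file_content edits (compute_modified_ranges file_content edits)


-- ===== LEMMAS AND PROOFS =====

-- the tuple → dict embedding used to relate B's pairs to A's dicts
def pvToDict (p : Int × Int) : List (String × Int) := [("start", p.1), ("end", p.2)]

theorem pvCountGo_singleton (c : Char) (l : List Char) (fuel acc : Nat)
    (h : l.length ≤ fuel) :
    PySem.Chars.count.go [c] fuel l acc = acc + l.count c := by
  induction l generalizing fuel acc with
  | nil => cases fuel <;> simp [PySem.Chars.count.go]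
  | cons x t ih =>
    cases fuel with
    | zero => simp at h
    | succ fuel =>
      rw [PySem.Chars.count.go]
      simp only [List.length_cons, Nat.succ_le_succ_iff] at h
      have hpre : List.isPrefixOf [c] (x :: t) = (c == x) := by
        simp [List.isPrefixOf]
      by_cases hc : c = x
      · subst hc
        rw [hpre]
        simp only [beq_self_eq_true, if_pos, List.length_singleton,
          List.drop_succ_cons, List.drop_zero, ih fuel (acc + 1) h,
          List.count_cons_self]
        omega
      · rw [hpre]
        have : (c == x) = false := by simp [hc]
        rw [this]
        simp only [Bool.false_eq_true, ih fuel acc h, List.count_cons]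
        simp [Ne.symm hc]

theorem pvCount_singleton (l : List Char) (c : Char) :
    PySem.Chars.count l [c] = l.count c := by
  have h := pvCountGo_singleton c l l.length 0 le_rfl
  simp [PySem.Chars.count, h]

theorem pvLineTable_aux (cs : List Char) :
    (cs.foldl (fun (st : List Int × Int) ch =>
        let ln := if ch = '\n' then st.2 + 1 else st.2
        (st.1 ++ [ln], ln)) ([1], 1)) =
      ((List.range (cs.length + 1)).map (fun i => 1 + ((cs.take i).count '\n' : Int)),
       1 + (cs.count '\n' : Int)) := by
  induction cs using List.reverseRecOn with
  | nil => simp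
  | append_singleton cs' c ih =>
    rw [List.foldl_append, ih]
    simp only [List.foldl_cons, List.foldl_nil]
    refine Prod.ext ?_ ?_
    · show _ ++ _ = _
      simp only [List.length_append, List.length_singleton]
      conv_rhs => rw [List.range_succ, List.map_append]
      congr 1
      · apply List.map_congr_left
        intro i hi
        rw [List.mem_range] at hi
        rw [List.take_append_of_le_length (by omega)]
      · simp only [List.map_cons, List.map_nil]
        rw [List.take_of_length_le (by simp)]
        rw [List.count_append]
        by_cases hc : c = '\n' <;> simp [hc] <;> push_cast <;> ring
    · show (if c = '\n' then _ else _) = _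
      rw [List.count_append]
      by_cases hc : c = '\n' <;> simp [hc] <;> push_cast <;> ring

theorem pvLineTable_get (fc : String) (idx : Int) (h0 : 0 ≤ idx)
    (h1 : idx.toNat ≤ fc.toList.length) :
    PySem.List.pyGetD (pvLineTable fc) idx 0 =
      ((fc.toList.take idx.toNat).count '\n' : Int) + 1 := by
  have hlist : pvLineTable fc =
      (List.range (fc.toList.length + 1)).map
        (fun i => 1 + ((fc.toList.take i).count '\n' : Int)) := by
    unfold pvLineTable
    rw [pvLineTable_aux]
  have hlen : idx < ((pvLineTable fc).length : Int) := by
    rw [hlist]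
    simp only [List.length_map, List.length_range]
    omega
  rw [PySem.List.pyGetD_eq_getElem _ _ h0 hlen]
  simp only [hlist, List.getElem_map, List.getElem_range]
  ring

theorem pvCountSlice (s : String) (b : Int) (hb : 0 ≤ b) :
    PySem.Str.count (PySem.Str.slice s none (some b)) "\n" =
      PySem.Chars.count (s.toList.take b.toNat) ['\n'] := by
  rw [PySem.Str.count, PySem.Str.slice, String.toList_ofList]
  have h1 : PySem.Chars.slice s.toList none (some b) = s.toList.take b.toNat :=
    PySem.List.slice_to _ hb
  rw [h1]
  rfl

-- the edit loop: A's dict ranges are B's pairs, embedded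
theorem pvLoop_eq (fc : String) (edits : List (List (String × String)))
    (pairs : List (Int × Int)) (k : Nat) (hk : k ≤ fc.toList.length) :
    edits.foldl
      (fun (st : List (List (String × Int)) × Int) edit =>
        let new_str := pvDictGetD edit "new_string" ""
        if new_str = "" then st
        else
          let idx0 := PySem.Str.findFrom fc new_str st.2
          let idx := if idx0 < 0 then PySem.Str.find fc new_str else idx0
          if 0 ≤ idx then
            let start_line := (PySem.Str.count (PySem.Str.slice fc none (some idx)) "\n" : Int) + 1
            let end_line := start_line + (PySem.Str.count new_str "\n" : Int)
            (st.1 ++ [[("start", start_line), ("end", end_line)]], idx + PySem.Str.len new_str)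
          else st)
      (pairs.map pvToDict, (k : Int)) =
    (fun (st : List (Int × Int) × Int) => (st.1.map pvToDict, st.2))
      (edits.foldl
        (fun (st : List (Int × Int) × Int) edit =>
          let new_str := pvDictGetD edit "new_string" ""
          if new_str = "" then st
          else
            let idx0 := PySem.Str.findFrom fc new_str st.2
            let idx := if idx0 < 0 then PySem.Str.find fc new_str else idx0
            if 0 ≤ idx then
              let start := PySem.List.pyGetD (pvLineTable fc) idx 0
              (st.1 ++ [(start, start + (PySem.Str.count new_str "\n" : Int))], idx + PySem.Str.len new_str)
            else st)
        (pairs, (k : Int))) := by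
  induction edits generalizing pairs k with
  | nil => rfl
  | cons e rest ih =>
    simp only [List.foldl_cons]
    by_cases hs : pvDictGetD e "new_string" "" = ""
    · rw [if_pos hs, if_pos hs]
      exact ih pairs k hk
    · rw [if_neg hs, if_neg hs]
      set new_str := pvDictGetD e "new_string" "" with hns
      have hnl : new_str.toList ≠ [] := by simpa using hs
      set idx0 := PySem.Str.findFrom fc new_str (k : Int) with hidx0
      set idx : Int := if idx0 < 0 then PySem.Str.find fc new_str else idx0 with hidx
      by_cases hpos : 0 ≤ idx
      · rw [if_pos hpos, if_pos hpos]
        have hprefix : new_str.toList <+: fc.toList.drop idx.toNat := by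
          by_cases hneg : idx0 < 0
          · have : idx = PySem.Chars.find fc.toList new_str.toList := by
              rw [hidx, if_pos hneg, PySem.Str.find_eq]
            rw [this] at hpos ⊢
            exact (PySem.Chars.find_spec hpos).1
          · have heq : idx = PySem.Chars.findFrom fc.toList new_str.toList (k : Int) := by
              rw [hidx, if_neg hneg, hidx0, PySem.Str.findFrom_eq]
            have hne : PySem.Chars.findFrom fc.toList new_str.toList (k : Int) ≠ -1 := by
              rw [← heq]; omega
            have := (PySem.Chars.findFrom_natCast_spec fc.toList new_str.toList k hk hne).2.1
            rw [heq]
            exact this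
        have hlen : idx.toNat + new_str.toList.length ≤ fc.toList.length := by
          have h1 := hprefix.length_le
          rw [List.length_drop] at h1
          have h2 : idx.toNat ≤ fc.toList.length := by
            by_contra hcon
            push_neg at hcon
            have : fc.toList.length - idx.toNat = 0 := by omega
            rw [this] at h1
            exact hnl (List.eq_nil_of_length_eq_zero (by omega))
          omega
        have hidxle : idx.toNat ≤ fc.toList.length := by omega
        have hstart := pvLineTable_get fc idx hpos hidxle
        have hA : (PySem.Str.count (PySem.Str.slice fc none (some idx)) "\n" : Int) =
            ((fc.toList.take idx.toNat).count '\n' : Int) := by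
          rw [pvCountSlice fc idx hpos, pvCount_singleton]
        have hoff : idx + PySem.Str.len new_str =
            ((idx.toNat + new_str.toList.length : Nat) : Int) := by
          rw [PySem.Str.len_eq]; push_cast; omega
        rw [hstart, hA, hoff]
        have hmap : (pairs.map pvToDict) ++
            [[("start", ((fc.toList.take idx.toNat).count '\n' : Int) + 1),
              ("end", ((fc.toList.take idx.toNat).count '\n' : Int) + 1 + (PySem.Str.count new_str "\n" : Int))]] =
            (pairs ++ [(((fc.toList.take idx.toNat).count '\n' : Int) + 1,
              ((fc.toList.take idx.toNat).count '\n' : Int) + 1 + (PySem.Str.count new_str "\n" : Int))]).map pvToDict := by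
          rw [List.map_append]; rfl
        rw [hmap]
        exact ih _ _ (by omega)
      · rw [if_neg hpos, if_neg hpos]
        exact ih pairs k hk

theorem pvKey_toDict (p : Int × Int) : pvDictGetIntD (pvToDict p) "start" 0 = p.1 := rfl

theorem pvMap_insertBy (bef : Int × Int → Int × Int → Bool)
    (bef' : List (String × Int) → List (String × Int) → Bool)
    (hb : ∀ a b, bef' (pvToDict a) (pvToDict b) = bef a b)
    (x : Int × Int) (ys : List (Int × Int)) :
    PySem.List.insertBy bef' (pvToDict x) (ys.map pvToDict) =
      (PySem.List.insertBy bef x ys).map pvToDict := by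
  induction ys with
  | nil => simp [PySem.List.insertBy]
  | cons y t ih =>
    rw [List.map_cons, PySem.List.insertBy, PySem.List.insertBy, hb]
    by_cases h : bef x y
    · simp [h]
    · simp only [h, Bool.false_eq_true, ih]
      simp

-- the sort commutes with the embedding (same key values, same stable sort)
theorem pvSorted_map (pairs : List (Int × Int)) :
    PySem.List.sorted (pairs.map pvToDict) (fun r => pvDictGetIntD r "start" 0) =
      (PySem.List.sorted pairs (fun p => p.1)).map pvToDict := by
  rw [PySem.List.sorted_eq_foldl_insertBy, PySem.List.sorted_eq_foldl_insertBy]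
  have main : ∀ (l acc : List (Int × Int)),
      (l.map pvToDict).foldl
        (fun a x => PySem.List.insertBy
          (fun a b => decide (pvDictGetIntD a "start" 0 < pvDictGetIntD b "start" 0)) x a)
        (acc.map pvToDict) =
      (l.foldl (fun a x => PySem.List.insertBy (fun a b => decide (a.1 < b.1)) x a) acc).map pvToDict := by
    intro l
    induction l with
    | nil => intro acc; simp
    | cons x t ih =>
      intro acc
      simp only [List.map_cons, List.foldl_cons]
      rw [pvMap_insertBy (fun a b => decide (a.1 < b.1)) _
        (fun a b => by rw [pvKey_toDict, pvKey_toDict]) x acc]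
      exact ih _
  exact main pairs []

theorem pvSet_last {α : Type} (xs : List α) (v : α) (h : xs ≠ []) :
    xs.set (xs.length - 1) v = xs.dropLast ++ [v] := by
  conv_lhs => rw [← List.dropLast_concat_getLast h]
  rw [List.set_append_right _ _ (by simp [List.length_dropLast])]
  simp [List.length_dropLast]

theorem pvSet_neg_one {α : Type} (xs : List α) (v : α) (h : xs ≠ []) :
    PySem.List.pySetD xs (-1) v = xs.dropLast ++ [v] := by
  have hn : 0 < xs.length := List.length_pos_iff.mpr h
  have : PySem.List.pyIdx? xs.length (-1) = some (xs.length - 1) := by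
    simp [PySem.List.pyIdx?]; omega
  simp [PySem.List.pySetD, PySem.List.pySet?, this, pvSet_last xs v h]

theorem pvGetLast_map (acc : List (Int × Int)) (h : acc ≠ []) :
    PySem.List.pyGetD (acc.map pvToDict) (-1) [] =
      pvToDict (PySem.List.pyGetD acc (-1) (0, 0)) := by
  have h' : acc.map pvToDict ≠ [] := by simpa using h
  rw [PySem.List.pyGetD_neg_one _ _ h', PySem.List.pyGetD_neg_one _ _ h]
  rw [List.getLast_map]

-- the merge folds correspond under the embedding
theorem pvMerge_fold (t : List (Int × Int)) (acc : List (Int × Int)) (h : acc ≠ []) :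
    (t.map pvToDict).foldl
      (fun merged current =>
        let last := PySem.List.pyGetD merged (-1) []
        if pvDictGetIntD current "start" 0 ≤ pvDictGetIntD last "end" 0 + 1 then
          merged.dropLast ++
            [pvDictSetInt last "end"
              (max (pvDictGetIntD last "end" 0) (pvDictGetIntD current "end" 0))]
        else merged ++ [current])
      (acc.map pvToDict) =
    (t.foldl
      (fun (merged : List (Int × Int)) p =>
        if merged ≠ [] ∧ p.1 ≤ (PySem.List.pyGetD merged (-1) (0, 0)).2 + 1 then
          let last := PySem.List.pyGetD merged (-1) (0, 0)
          PySem.List.pySetD merged (-1) (last.1, max last.2 p.2)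
        else merged ++ [p])
      acc).map pvToDict := by
  induction t generalizing acc with
  | nil => simp
  | cons p t ih =>
    simp only [List.map_cons, List.foldl_cons]
    set last := PySem.List.pyGetD acc (-1) (0, 0) with hlast
    have hget := pvGetLast_map acc h
    by_cases hc : p.1 ≤ last.2 + 1
    · have hcond : pvDictGetIntD (pvToDict p) "start" 0 ≤
          pvDictGetIntD (PySem.List.pyGetD (acc.map pvToDict) (-1) []) "end" 0 + 1 := by
        rw [hget]; exact hc
      rw [if_pos hcond, if_pos ⟨h, hc⟩]
      rw [hget, pvSet_neg_one _ _ h]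
      have : (acc.map pvToDict).dropLast ++
            [pvDictSetInt (pvToDict last) "end"
              (max (pvDictGetIntD (pvToDict last) "end" 0) (pvDictGetIntD (pvToDict p) "end" 0))] =
          (acc.dropLast ++ [(last.1, max last.2 p.2)]).map pvToDict := by
        rw [List.map_append, List.map_dropLast]
        rfl
      rw [this]
      exact ih _ (by simp)
    · have hcond : ¬ (pvDictGetIntD (pvToDict p) "start" 0 ≤
          pvDictGetIntD (PySem.List.pyGetD (acc.map pvToDict) (-1) []) "end" 0 + 1) := by
        rw [hget]; exact hc
      rw [if_neg hcond, if_neg (by tauto)]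
      have : acc.map pvToDict ++ [pvToDict p] = (acc ++ [p]).map pvToDict := by
        rw [List.map_append]; rfl
      rw [this]
      exact ih _ (by simp)

theorem pvMergeTop (P : List (Int × Int)) :
    pvMergeRanges (P.map pvToDict) =
      ((PySem.List.sorted P (fun p => p.1)).foldl
        (fun (merged : List (Int × Int)) p =>
          if merged ≠ [] ∧ p.1 ≤ (PySem.List.pyGetD merged (-1) (0, 0)).2 + 1 then
            let last := PySem.List.pyGetD merged (-1) (0, 0)
            PySem.List.pySetD merged (-1) (last.1, max last.2 p.2)
          else merged ++ [p])
        []).map pvToDict := by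
  unfold pvMergeRanges
  rcases hQ : PySem.List.sorted P (fun p => p.1) with _ | ⟨q, t⟩
  · have hPnil : P = [] := by
      have := PySem.List.sorted_eq_nil_iff (xs := P) (key := fun p : Int × Int => p.1) (rev := false)
      rw [hQ] at this
      exact this.mp rfl
    rw [hPnil]
    simp
  · have hPne : P ≠ [] := by
      intro hcon
      rw [hcon] at hQ
      simp [PySem.List.sorted] at hQ
    have hmapne : P.map pvToDict ≠ [] := by simpa using hPne
    rw [if_neg hmapne]
    rw [pvSorted_map, hQ]
    simp only [List.foldl_cons, List.map_cons]
    rw [PySem.List.slice_from_one]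
    have hhead : PySem.List.pyGetD (pvToDict q :: t.map pvToDict) 0 [] = pvToDict q := by
      simp [PySem.List.pyGetD, PySem.List.pyGet?, PySem.List.pyIdx?]
    rw [hhead]
    show (t.map pvToDict).foldl _ ([q].map pvToDict) = _
    rw [pvMerge_fold t [q] (by simp)]
    congr 2

-- ===== VERDICT (by name: the statement is the Claim_ definition above) =====
theorem compute_modified_ranges_spec : Claim_equal_compute_modified_ranges := by
  intro fc edits _
  unfold Spec_compute_modified_ranges
  unfold compute_modified_ranges compute_modified_ranges_alt
  have hloop := pvLoop_eq fc edits [] 0 (Nat.zero_le _)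
  simp only [List.map_nil, Nat.cast_zero] at hloop
  show pvMergeRanges _ = _
  rw [hloop]
  exact pvMergeTop _
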